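-- pv_equiv track=rewrite | github.com/VincentKleis/PublicProjects | python_programming/DATA110/lab/lab10/oppgave3.py | koble
-- ===== SOURCE A (Python) =====
-- def koble(tup: list, tup2:list) -> list:
--     list = []
--     count = 0
--     while len(tup) > count:
--         v, x = tup[count]
--         count2 = 0
--         while len(tup2) > count2:
--             y, z = tup2[count2]
--             if y == x:
--                 list.append( (v,z) )
--             count2 += 1
--         count += 1
--
--     return list
-- ===== SOURCE B (Python) =====
-- def koble(tup: list, tup2: list) -> list:
--     index = {}
--     for y, z in tup2:
--         index.setdefault(y, []).append(z)
--     return [(v, z) for v, x in tup for z in index.get(x, [])]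
-- ===== Notes on version B (the rewrite author's own statement) =====
-- stated objective: faster
-- what changed: Replaced the nested quadratic scan with a hash join: one pass over tup2 builds a dict from key to its values in order, then one pass over tup emits the joined pairs.
import Mathlib
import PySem

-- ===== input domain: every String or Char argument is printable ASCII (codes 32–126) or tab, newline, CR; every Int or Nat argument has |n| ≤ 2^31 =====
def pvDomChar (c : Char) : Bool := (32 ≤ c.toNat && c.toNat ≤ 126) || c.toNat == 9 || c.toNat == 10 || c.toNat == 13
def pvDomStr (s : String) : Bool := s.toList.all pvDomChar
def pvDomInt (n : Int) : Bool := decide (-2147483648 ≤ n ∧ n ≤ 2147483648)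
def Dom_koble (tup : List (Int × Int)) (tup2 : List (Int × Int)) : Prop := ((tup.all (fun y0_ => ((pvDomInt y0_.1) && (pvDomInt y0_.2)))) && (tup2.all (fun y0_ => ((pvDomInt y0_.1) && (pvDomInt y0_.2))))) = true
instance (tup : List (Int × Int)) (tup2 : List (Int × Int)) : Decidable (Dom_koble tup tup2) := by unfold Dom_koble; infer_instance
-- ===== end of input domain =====

-- B replaces A's nested O(n*m) scan with a hash join: one pass over tup2 builds a
-- dict key → values (in order), then one pass over tup emits the joined pairs.

-- ===== PORT A =====
-- inner while: count2 walks tup2 front-to-back, appending (v, z) on key match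
def kobleInner (v x : Int) (rest : List (Int × Int)) (acc : List (Int × Int)) : List (Int × Int) :=
  match rest with
  | [] => acc
  | (y, z) :: t => kobleInner v x t (if y == x then acc ++ [(v, z)] else acc)

-- outer while: count walks tup front-to-back, running the inner loop for each (v, x)
def kobleOuter (rest : List (Int × Int)) (tup2 : List (Int × Int)) (acc : List (Int × Int)) : List (Int × Int) :=
  match rest with
  | [] => acc
  | (v, x) :: t => kobleOuter t tup2 (kobleInner v x tup2 acc)

def koble (tup : List (Int × Int)) (tup2 : List (Int × Int)) : List (Int × Int) :=
  kobleOuter tup tup2 []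

-- ===== PORT B =====
def koble_alt (tup : List (Int × Int)) (tup2 : List (Int × Int)) : List (Int × Int) :=
  -- index.setdefault(y, []).append(z)  ==  modify y [] (· ++ [z])
  let index : PySem.Dict Int (List Int) :=
    tup2.foldl (fun d p => d.modify p.1 [] (· ++ [p.2])) PySem.Dict.empty
  tup.flatMap (fun vx => (index.getD vx.2 []).map (fun z => (vx.1, z)))

-- ===== PRECONDITION & SPEC =====
def Spec_koble (tup : List (Int × Int)) (tup2 : List (Int × Int)) (out : List (Int × Int)) : Prop := out = koble_alt tup tup2
instance (tup : List (Int × Int)) (tup2 : List (Int × Int)) (out : List (Int × Int)) : Decidable (Spec_koble tup tup2 out) := by unfold Spec_koble; infer_instance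

-- ===== CLAIM (what is proved, stated in full; the proofs are below) =====
def Claim_equal_koble : Prop := ∀ (tup : List (Int × Int)) (tup2 : List (Int × Int)), Dom_koble tup tup2 → Spec_koble tup tup2 (koble tup tup2)

-- ===== LEMMAS AND PROOFS =====

theorem kobleInner_eq (v x : Int) (rest acc : List (Int × Int)) :
    kobleInner v x rest acc = acc ++ (rest.filter (fun p => p.1 == x)).map (fun p => (v, p.2)) := by
  induction rest generalizing acc with
  | nil => simp [kobleInner]
  | cons h t ih =>
    obtain ⟨y, z⟩ := h
    simp only [kobleInner, ih]
    by_cases hyx : y == x <;> simp [hyx]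

theorem kobleOuter_eq (rest tup2 acc : List (Int × Int)) :
    kobleOuter rest tup2 acc =
      acc ++ rest.flatMap (fun vx => (tup2.filter (fun p => p.1 == vx.2)).map (fun p => (vx.1, p.2))) := by
  induction rest generalizing acc with
  | nil => simp [kobleOuter]
  | cons h t ih =>
    obtain ⟨v, x⟩ := h
    simp [kobleOuter, ih, kobleInner_eq]

-- ===== VERDICT (by name: the statement is the Claim_ definition above) =====
theorem koble_spec : Claim_equal_koble := by
  intro tup tup2 _
  show koble tup tup2 = koble_alt tup tup2
  unfold koble koble_alt
  rw [kobleOuter_eq]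
  simp only [List.nil_append]
  apply List.flatMap_congr
  intro vx _
  rw [PySem.Dict.getD_foldl_modify_append, PySem.Dict.getD_empty]
  simp [List.map_map, Function.comp]
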